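-- pv_equiv track=rewrite | github.com/klaerik/Advent-of-Code | day11.py | get_max_cell
-- ===== SOURCE A (Python) =====
-- def get_max_cell(grid, fixed):
--     max_cell = 0, 0, 0, 0
--     for y in range(1, 298):
--         for x in range(1, 298):
--             cell = [val for row in grid[y: y+3] for val in row[x: x+3]]
--             ttl = sum(cell)
--             if ttl > max_cell[3]:
--                 max_cell = x, y, len(cell), ttl
--     return max_cell
-- ===== SOURCE B (Python) =====
-- def _row_windows(row):
--     """Sum and size of the 3-wide window row[x:x+3], for x = 1..297."""
--     windows = [row[x:x+3] for x in range(1, 298)]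
--     return [(sum(w), len(w)) for w in windows]
--
-- def get_max_cell(grid, fixed):
--     # Separable 2D window: compute each row's 1-D horizontal window sums once,
--     # then every 3x3 block is just the sum of three precomputed row windows.
--     wins = [_row_windows(row) for row in grid]
--     best = 0, 0, 0, 0
--     for y in range(1, 298):
--         band = wins[y:y+3]
--         for x in range(1, 298):
--             ttl = sum(w[x-1][0] for w in band)
--             if ttl > best[3]:
--                 best = x, y, sum(w[x-1][1] for w in band), ttl
--     return best
-- ===== Notes on version B (the rewrite author's own statement) =====
-- stated objective: alternative
-- what changed: Uses the separable-filter decomposition: each row's 1-D 3-wide window sums/sizes are computed once up front, and every 3x3 block total is then the sum of three precomputed row-window entries instead of building and summing a fresh 9-element cell list per position.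
import Mathlib
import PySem

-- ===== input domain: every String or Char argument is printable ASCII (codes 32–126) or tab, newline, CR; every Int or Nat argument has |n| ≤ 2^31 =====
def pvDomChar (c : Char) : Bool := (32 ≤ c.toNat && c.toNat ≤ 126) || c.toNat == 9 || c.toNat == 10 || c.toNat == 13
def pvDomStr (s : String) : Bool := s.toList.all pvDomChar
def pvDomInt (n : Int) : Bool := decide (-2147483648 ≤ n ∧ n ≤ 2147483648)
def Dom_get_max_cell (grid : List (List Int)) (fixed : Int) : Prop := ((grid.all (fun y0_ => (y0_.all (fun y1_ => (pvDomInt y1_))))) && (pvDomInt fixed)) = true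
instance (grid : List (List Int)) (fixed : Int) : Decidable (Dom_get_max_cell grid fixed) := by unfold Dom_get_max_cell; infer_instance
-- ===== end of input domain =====

-- B computes each row's 1-D 3-wide window sums once and combines three of them per 3x3 block (separable decomposition); alternative, similar cost.

-- ===== PORT A =====
def get_max_cell (grid : List (List Int)) (fixed : Int) : Int × Int × Int × Int :=
  (PySem.List.pyRange 1 298 1).foldl (fun mc y =>
    (PySem.List.pyRange 1 298 1).foldl (fun mc x =>
      let cell := (PySem.List.slice grid (some y) (some (y + 3))).flatMap
        (fun row => PySem.List.slice row (some x) (some (x + 3)))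
      let ttl := cell.sum
      if ttl > mc.2.2.2 then (x, y, (cell.length : Int), ttl) else mc) mc) (0, 0, 0, 0)

-- ===== PORT B =====
-- _row_windows: the (sum, size) of row[x:x+3] for x = 1..297
def pvRowWindows (row : List Int) : List (Int × Int) :=
  let windows := (PySem.List.pyRange 1 298 1).map
    (fun x => PySem.List.slice row (some x) (some (x + 3)))
  windows.map (fun w => (w.sum, (w.length : Int)))

def get_max_cell_alt (grid : List (List Int)) (fixed : Int) : Int × Int × Int × Int :=
  let wins := grid.map pvRowWindows
  (PySem.List.pyRange 1 298 1).foldl (fun best y =>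
    let band := PySem.List.slice wins (some y) (some (y + 3))
    (PySem.List.pyRange 1 298 1).foldl (fun best x =>
      let ttl := band.foldl (fun a w => a + (PySem.List.pyGetD w (x - 1) (0, 0)).1) 0
      if ttl > best.2.2.2 then
        (x, y, band.foldl (fun a w => a + (PySem.List.pyGetD w (x - 1) (0, 0)).2) 0, ttl)
      else best) best) (0, 0, 0, 0)

-- ===== PRECONDITION & SPEC =====
def Spec_get_max_cell (grid : List (List Int)) (fixed : Int) (out : Int × Int × Int × Int) : Prop := out = get_max_cell_alt grid fixed
instance (grid : List (List Int)) (fixed : Int) (out : Int × Int × Int × Int) : Decidable (Spec_get_max_cell grid fixed out) := by unfold Spec_get_max_cell; infer_instance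

-- ===== CLAIM (what is proved, stated in full; the proofs are below) =====
def Claim_equal_get_max_cell : Prop := ∀ (grid : List (List Int)) (fixed : Int), Dom_get_max_cell grid fixed → Spec_get_max_cell grid fixed (get_max_cell grid fixed)

-- ===== LEMMAS AND PROOFS =====

-- B's wins[y:y+3] is pvRowWindows mapped over A's 3-row band grid[y:y+3]
theorem band_map (grid : List (List Int)) (y : Int) (hy : 0 ≤ y) :
    PySem.List.slice (grid.map pvRowWindows) (some y) (some (y + 3)) =
      (PySem.List.slice grid (some y) (some (y + 3))).map pvRowWindows := by
  rw [PySem.List.slice_toNat _ hy (by omega), PySem.List.slice_toNat _ hy (by omega)]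
  rw [← List.map_drop, ← List.map_take]

-- indexing a row's precomputed window table recovers the window slice
theorem rowWindows_getD (row : List Int) (x : Int) (hx1 : 1 ≤ x) (hx2 : x < 298) :
    PySem.List.pyGetD (pvRowWindows row) (x - 1) ((0 : Int), (0 : Int)) =
      ((PySem.List.slice row (some x) (some (x + 3))).sum,
       ((PySem.List.slice row (some x) (some (x + 3))).length : Int)) := by
  unfold pvRowWindows
  dsimp only
  rw [List.map_map]
  have hk : (x - 1) = (((x - 1).toNat : Nat) : Int) := by omega
  rw [hk, PySem.List.pyGetD_map_pyRange_one _ 1 298 _ _ (by omega)]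
  have hx : (1 : Int) + ((x - 1).toNat : Int) = x := by omega
  simp only [hx]
  rfl

-- the sum (resp. total length) of a flatMap is the sum of the pieces' sums (lengths)
theorem sum_flatMap_int (l : List (List Int)) (f : List Int → List Int) :
    (l.flatMap f).sum = (l.map (fun r => (f r).sum)).sum := by
  induction l with
  | nil => simp
  | cons h t ih => simp [List.flatMap_cons, ih]

theorem length_flatMap_int (l : List (List Int)) (f : List Int → List Int) :
    ((l.flatMap f).length : Int) = (l.map (fun r => ((f r).length : Int))).sum := by
  induction l with
  | nil => simp
  | cons h t ih =>
    simp only [List.flatMap_cons, List.length_append, List.map_cons, List.sum_cons]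
    push_cast
    rw [ih]

-- ===== VERDICT (by name: the statement is the Claim_ definition above) =====
theorem get_max_cell_spec : Claim_equal_get_max_cell := by
  intro grid fixed _
  unfold Spec_get_max_cell get_max_cell get_max_cell_alt
  dsimp only
  apply PySem.List.foldl_congr_mem
  intro mc y hy
  rw [PySem.List.mem_pyRange_one] at hy
  apply PySem.List.foldl_congr_mem
  intro acc x hx
  rw [PySem.List.mem_pyRange_one] at hx
  rw [band_map grid y (by omega)]
  rw [PySem.List.foldl_add, PySem.List.foldl_add]
  rw [List.map_map, List.map_map]
  have hrw : ∀ r : List Int,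
      ((fun w => (PySem.List.pyGetD w (x - 1) ((0:Int),(0:Int))).1) ∘ pvRowWindows) r =
        (PySem.List.slice r (some x) (some (x + 3))).sum := by
    intro r
    simp [Function.comp, rowWindows_getD r x (by omega) (by omega)]
  have hrw2 : ∀ r : List Int,
      ((fun w => (PySem.List.pyGetD w (x - 1) ((0:Int),(0:Int))).2) ∘ pvRowWindows) r =
        ((PySem.List.slice r (some x) (some (x + 3))).length : Int) := by
    intro r
    simp [Function.comp, rowWindows_getD r x (by omega) (by omega)]
  rw [List.map_congr_left (fun r _ => hrw r), List.map_congr_left (fun r _ => hrw2 r)]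
  rw [← sum_flatMap_int, ← length_flatMap_int]
  simp
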